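-- pv_equiv track=rewrite | github.com/rymareveg-cyber/VPa05.-PDF-generator | main.py | detect_invoice_field
-- ===== SOURCE A (Python) =====
-- from typing import List, Dict, Any, Optional
--
-- def detect_invoice_field(records: List[Dict[str, Any]]) -> Optional[str]:
--     if not records:
--         return None
--     key_counts: Dict[str, int] = {}
--     for rec in records:
--         for k in rec.keys():
--             key_counts[k] = key_counts.get(k, 0) + 1
--
--     keys = list(key_counts.keys())
--     normalized = {k: k.lower().replace(" ", "").replace("-", "").replace("_", "") for k in keys}
--
--     candidates_priority = [
--         "invoiceid",
--         "invoice_id",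
--         "invoice",
--         "inv_id",
--         "id",
--     ]
--
--     for cand in candidates_priority:
--         for k, norm in normalized.items():
--             if norm == cand.replace("_", ""):
--                 return k
--
--     contains_candidates = []
--     for k, norm in normalized.items():
--         if "invoice" in norm and ("id" in norm or norm.endswith("no") or norm.endswith("number")):
--             contains_candidates.append(k)
--     if contains_candidates:
--         contains_candidates.sort(key=lambda kk: (-key_counts.get(kk, 0), len(kk)))
--         return contains_candidates[0]
--
--     for k, norm in normalized.items():
--         if norm == "id":
--             return k
--     return None
-- ===== SOURCE B (Python) =====
-- def detect_invoice_field(records):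
--     # One streaming pass over the records: each key is classified once, at its
--     # first occurrence; counts accumulate alongside; the fallback winner is
--     # taken with min() instead of a sort.
--     counts = {}
--     best = None        # (rank, key); earliest-seen key wins rank ties
--     fallback = []      # pred-matching rankless keys, first-seen order
--     for rec in records:
--         for k in rec:
--             if k in counts:
--                 counts[k] += 1
--                 continue
--             counts[k] = 1
--             n = k.lower().replace(" ", "").replace("-", "").replace("_", "")
--             if n == "invoiceid":
--                 r = 0
--             elif n == "invoice":
--                 r = 2
--             elif n == "invid":
--                 r = 3
--             elif n == "id":
--                 r = 4
--             else:
--                 r = None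
--             if r is not None:
--                 if best is None or r < best[0]:
--                     best = (r, k)
--             elif "invoice" in n and ("id" in n or n.endswith("no") or n.endswith("number")):
--                 fallback.append(k)
--     if best is not None:
--         return best[1]
--     if fallback:
--         return min(fallback, key=lambda kk: (-counts[kk], len(kk)))
--     return None
-- ===== Notes on version B (the rewrite author's own statement) =====
-- stated objective: alternative
-- what changed: A's staged pipeline (count dict, normalized dict, 5-candidate exact-match loops each rescanning all keys, sort-based fallback, dead norm=='id' loop) is replaced by ONE streaming pass over the records that classifies every key at its first occurrence while counts accumulate alongside (tracking the minimal-rank key and collecting fallback candidates), and the fallback sort is replaced by a linear min() with the same tuple key (Python's min returns the first minimum, matching the stable sort's head).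
import Mathlib
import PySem

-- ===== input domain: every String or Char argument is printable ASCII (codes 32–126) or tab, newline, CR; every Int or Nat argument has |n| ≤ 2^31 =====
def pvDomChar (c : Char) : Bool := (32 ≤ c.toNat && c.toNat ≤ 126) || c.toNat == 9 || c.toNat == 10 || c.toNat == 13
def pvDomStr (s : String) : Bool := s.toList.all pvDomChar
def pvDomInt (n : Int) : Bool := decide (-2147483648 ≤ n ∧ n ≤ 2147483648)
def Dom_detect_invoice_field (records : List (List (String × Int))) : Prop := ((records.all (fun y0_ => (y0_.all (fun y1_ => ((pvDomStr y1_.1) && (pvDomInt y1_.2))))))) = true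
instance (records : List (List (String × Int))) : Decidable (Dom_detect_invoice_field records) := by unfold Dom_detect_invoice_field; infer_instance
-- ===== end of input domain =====

-- B replaces A's staged pipeline (count dict, normalized dict, 5-candidate loops each
-- rescanning all keys, sort-based fallback, dead norm=="id" loop) by ONE streaming pass
-- that classifies each key at its first occurrence, with min() instead of the sort
-- (objective: alternative).

-- shared normalization: both Pythons contain this code verbatim
def pvNorm (k : String) : String :=
  PySem.Str.replace (PySem.Str.replace (PySem.Str.replace (PySem.Str.lower k) " " "") "-" "") "_" ""

-- "invoice" in norm and ("id" in norm or norm.endswith("no") or norm.endswith("number"))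
def pvContPred (nrm : String) : Bool :=
  PySem.Str.isIn "invoice" nrm &&
    (PySem.Str.isIn "id" nrm || PySem.Str.endswith nrm "no" || PySem.Str.endswith nrm "number")

-- ===== PORT A =====
def pvKeyCounts (records : List (List (String × Int))) : PySem.Dict String Int :=
  records.foldl
    (fun d rec => (PySem.List.dedup (rec.map Prod.fst)).foldl
      (fun d k => d.insert k (d.getD k 0 + 1)) d)
    PySem.Dict.empty

-- for cand in candidates_priority: for k, norm in normalized.items(): if norm == cand.replace("_",""): return k
def pvPhaseA : List String → List (String × String) → Option String
  | [], _ => none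
  | c :: cs, items =>
    match items.find? (fun p => p.2 == PySem.Str.replace c "_" "") with
    | some p => some p.1
    | none => pvPhaseA cs items

def detect_invoice_field (records : List (List (String × Int))) : Option String :=
  if records = [] then none
  else
    let key_counts := pvKeyCounts records
    let keys := key_counts.keys
    let normalized := keys.foldl (fun d k => d.insert k (pvNorm k)) PySem.Dict.empty
    match pvPhaseA ["invoiceid", "invoice_id", "invoice", "inv_id", "id"] normalized.items with
    | some k => some k
    | none =>
      let contains_candidates := (normalized.items.filter (fun p => pvContPred p.2)).map (·.1)
      if contains_candidates ≠ [] then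
        match PySem.List.sorted2 contains_candidates
            (fun kk => -(key_counts.getD kk 0)) (fun kk => (PySem.Str.len kk : Int)) with
        | x :: _ => some x
        | [] => none
      else
        match normalized.items.find? (fun p => p.2 == "id") with
        | some p => some p.1
        | none => none

-- ===== PORT B =====
-- the if/elif chain assigning r
def pvRank? (n : String) : Option Int :=
  if n == "invoiceid" then some 0
  else if n == "invoice" then some 2
  else if n == "invid" then some 3
  else if n == "id" then some 4
  else none

-- the body of B's inner loop: state (counts, best, fallback), one key k
def pvScanKey (st : PySem.Dict String Int × Option (Int × String) × List String) (k : String) :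
    PySem.Dict String Int × Option (Int × String) × List String :=
  match st with
  | (counts, best, fb) =>
    if counts.contains k then (counts.insert k (counts.getD k 0 + 1), best, fb)
    else
      let counts' := counts.insert k 1
      let n := pvNorm k
      match pvRank? n with
      | some r =>
        (counts',
          (match best with
           | none => some (r, k)
           | some (br, bk) => if r < br then some (r, k) else some (br, bk)), fb)
      | none => if pvContPred n then (counts', best, fb ++ [k]) else (counts', best, fb)

def detect_invoice_field_alt (records : List (List (String × Int))) : Option String :=
  match records.foldl
      (fun st rec => (PySem.List.dedup (rec.map Prod.fst)).foldl pvScanKey st)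
      (PySem.Dict.empty, none, []) with
  | (counts, best, fb) =>
    match best with
    | some (_, k) => some k
    | none =>
      if fb ≠ [] then
        PySem.List.min2? fb (fun kk => -(counts.getD kk 0)) (fun kk => (PySem.Str.len kk : Int))
      else none

-- ===== PRECONDITION & SPEC =====
def Spec_detect_invoice_field (records : List (List (String × Int))) (out : Option String) : Prop := out = detect_invoice_field_alt records
instance (records : List (List (String × Int))) (out : Option String) : Decidable (Spec_detect_invoice_field records out) := by unfold Spec_detect_invoice_field; infer_instance

-- ===== CLAIM (what is proved, stated in full; the proofs are below) =====
def Claim_equal_detect_invoice_field : Prop := ∀ (records : List (List (String × Int))), Dom_detect_invoice_field records → Spec_detect_invoice_field records (detect_invoice_field records)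

-- ===== LEMMAS AND PROOFS =====

-- proof-only abbreviations
def pvCountStep (d : PySem.Dict String Int) (k : String) : PySem.Dict String Int :=
  d.insert k (d.getD k 0 + 1)

def pvKs (records : List (List (String × Int))) : List String :=
  records.flatMap (fun rec => PySem.List.dedup (rec.map Prod.fst))

-- first occurrences among ks of keys not yet in seen
def pvNewKeys : List String → List String → List String
  | [], _ => []
  | k :: ks, seen => if k ∈ seen then pvNewKeys ks seen else k :: pvNewKeys ks (k :: seen)

theorem pvNewKeys_cons_mem {k : String} {seen : List String} (ks : List String)
    (h : k ∈ seen) : pvNewKeys (k :: ks) seen = pvNewKeys ks seen := by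
  simp [pvNewKeys, h]

theorem pvNewKeys_cons_not_mem {k : String} {seen : List String} (ks : List String)
    (h : k ∉ seen) : pvNewKeys (k :: ks) seen = k :: pvNewKeys ks (k :: seen) := by
  simp [pvNewKeys, h]

def pvBestStep (best : Option (Int × String)) (k : String) : Option (Int × String) :=
  match pvRank? (pvNorm k) with
  | some r =>
    match best with
    | none => some (r, k)
    | some (br, bk) => if r < br then some (r, k) else some (br, bk)
  | none => best

-- canonical form of the one-pass minimum: the first key of the best achieved rank
def pvCanon (keys : List String) : Option (Int × String) :=
  match keys.find? (fun k => pvNorm k == "invoiceid") with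
  | some k => some (0, k)
  | none =>
    match keys.find? (fun k => pvNorm k == "invoice") with
    | some k => some (2, k)
    | none =>
      match keys.find? (fun k => pvNorm k == "invid") with
      | some k => some (3, k)
      | none =>
        match keys.find? (fun k => pvNorm k == "id") with
        | some k => some (4, k)
        | none => none

theorem pvFoldlFlatMap {α β σ : Type} (f : α → List β) (g : σ → β → σ) (l : List α) (i : σ) :
    (l.flatMap f).foldl g i = l.foldl (fun a x => (f x).foldl g a) i := by
  induction l generalizing i with
  | nil => rfl
  | cons x l ih => simp [List.flatMap_cons, List.foldl_append, ih]

theorem pvHeadFoldlInsertBy {α : Type} (before : α → α → Bool) (xs acc : List α) :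
    (xs.foldl (fun a x => PySem.List.insertBy before x a) acc).head? =
      xs.foldl (fun m x => match m with
        | none => some x
        | some m => if before x m then some x else some m) acc.head? := by
  induction xs generalizing acc with
  | nil => rfl
  | cons x xs ih =>
    simp only [List.foldl_cons]
    rw [ih]
    congr 1
    cases acc with
    | nil => rfl
    | cons y ys =>
      by_cases hby : before x y = true <;> simp [PySem.List.insertBy, hby]

theorem pvSortedHead {α : Type} (xs : List α) (k1 k2 : α → Int) :
    (PySem.List.sorted2 xs k1 k2).head? = PySem.List.min2? xs k1 k2 :=
  pvHeadFoldlInsertBy _ xs []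

theorem pvNewKeys_congr (ks : List String) : ∀ (s₁ s₂ : List String),
    (∀ x, x ∈ s₁ ↔ x ∈ s₂) → pvNewKeys ks s₁ = pvNewKeys ks s₂ := by
  induction ks with
  | nil => intro _ _ _; rfl
  | cons k ks ih =>
    intro s₁ s₂ h
    unfold pvNewKeys
    by_cases hm : k ∈ s₁
    · rw [if_pos hm, if_pos ((h k).mp hm)]; exact ih _ _ h
    · rw [if_neg hm, if_neg (fun hm2 => hm ((h k).mpr hm2))]
      congr 1
      exact ih _ _ (by intro x; simp [h x])

theorem pvKeysCountFold (ks : List String) : ∀ (d : PySem.Dict String Int),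
    (ks.foldl pvCountStep d).keys = d.keys ++ pvNewKeys ks d.keys := by
  induction ks with
  | nil => intro d; simp [pvNewKeys]
  | cons k ks ih =>
    intro d
    simp only [List.foldl_cons]
    by_cases hc : d.contains k = true
    · have hm : k ∈ d.keys := (PySem.Dict.contains_iff_mem_keys d k).mp hc
      have hkeys : (pvCountStep d k).keys = d.keys :=
        PySem.Dict.keys_insert_of_contains d _ hc
      rw [ih, hkeys, pvNewKeys_cons_mem ks hm]
    · have hc' : d.contains k = false := by simpa using hc
      have hm : k ∉ d.keys := fun hm => by
        simp [(PySem.Dict.contains_iff_mem_keys d k).mpr hm] at hc'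
      have hkeys : (pvCountStep d k).keys = d.keys ++ [k] :=
        PySem.Dict.keys_insert_of_not_contains d _ hc'
      rw [ih, hkeys, pvNewKeys_cons_not_mem ks hm,
        pvNewKeys_congr ks (d.keys ++ [k]) (k :: d.keys) (by intro x; simp; tauto)]
      simp

theorem pvBestStep_of_none {k : String} (h : pvRank? (pvNorm k) = none) (b : Option (Int × String)) :
    pvBestStep b k = b := by
  unfold pvBestStep; rw [h]

theorem pvBestStep_none_of_some {k : String} {r2 : Int} (h : pvRank? (pvNorm k) = some r2) :
    pvBestStep none k = some (r2, k) := by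
  unfold pvBestStep; rw [h]

theorem pvBestStep_some_of_some {k : String} {r2 : Int} (h : pvRank? (pvNorm k) = some r2)
    (r : Int) (k0 : String) :
    pvBestStep (some (r, k0)) k = if r2 < r then some (r2, k) else some (r, k0) := by
  unfold pvBestStep; rw [h]

theorem pvScanKey_contains (counts : PySem.Dict String Int) (best : Option (Int × String))
    (fb : List String) (k : String) (hc : counts.contains k = true) :
    pvScanKey (counts, best, fb) k = (pvCountStep counts k, best, fb) := by
  simp only [pvScanKey, pvCountStep]
  rw [if_pos hc]

theorem pvScanKey_new_rank {k : String} {r : Int} (hr : pvRank? (pvNorm k) = some r)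
    (counts : PySem.Dict String Int) (best : Option (Int × String)) (fb : List String)
    (hc : counts.contains k = false) :
    pvScanKey (counts, best, fb) k = (pvCountStep counts k, pvBestStep best k, fb) := by
  have hins : counts.insert k 1 = pvCountStep counts k := by
    unfold pvCountStep
    rw [PySem.Dict.getD_of_not_contains counts 0 hc]
    norm_num
  simp only [pvScanKey]
  rw [if_neg (by simp [hc])]
  simp only [hr, hins]
  cases best with
  | none => rw [pvBestStep_none_of_some hr]
  | some p =>
    obtain ⟨br, bk⟩ := p
    rw [pvBestStep_some_of_some hr br bk]

theorem pvScanKey_new_norank_pred {k : String} (hr : pvRank? (pvNorm k) = none)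
    (hp : pvContPred (pvNorm k) = true)
    (counts : PySem.Dict String Int) (best : Option (Int × String)) (fb : List String)
    (hc : counts.contains k = false) :
    pvScanKey (counts, best, fb) k = (pvCountStep counts k, best, fb ++ [k]) := by
  have hins : counts.insert k 1 = pvCountStep counts k := by
    unfold pvCountStep
    rw [PySem.Dict.getD_of_not_contains counts 0 hc]
    norm_num
  simp only [pvScanKey, hr, hins, if_pos hp]
  rw [if_neg (by simp [hc])]

theorem pvScanKey_new_norank_nopred {k : String} (hr : pvRank? (pvNorm k) = none)
    (hp : pvContPred (pvNorm k) = false)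
    (counts : PySem.Dict String Int) (best : Option (Int × String)) (fb : List String)
    (hc : counts.contains k = false) :
    pvScanKey (counts, best, fb) k = (pvCountStep counts k, best, fb) := by
  have hins : counts.insert k 1 = pvCountStep counts k := by
    unfold pvCountStep
    rw [PySem.Dict.getD_of_not_contains counts 0 hc]
    norm_num
  simp only [pvScanKey, hr, hins, hp]
  rw [if_neg (by simp [hc])]
  simp

set_option maxHeartbeats 2000000 in
theorem pvScanInv (ks : List String) :
    ∀ (d : PySem.Dict String Int) (best : Option (Int × String)) (fb : List String),
    ks.foldl pvScanKey (d, best, fb) =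
      (ks.foldl pvCountStep d,
       (pvNewKeys ks d.keys).foldl pvBestStep best,
       fb ++ (pvNewKeys ks d.keys).filter
         (fun k => (pvRank? (pvNorm k)).isNone && pvContPred (pvNorm k))) := by
  induction ks with
  | nil => intro d best fb; simp [pvNewKeys]
  | cons k ks ih =>
    intro d best fb
    simp only [List.foldl_cons]
    by_cases hc : d.contains k = true
    · have hm : k ∈ d.keys := (PySem.Dict.contains_iff_mem_keys d k).mp hc
      have hkeys : (pvCountStep d k).keys = d.keys :=
        PySem.Dict.keys_insert_of_contains d _ hc
      rw [pvScanKey_contains d best fb k hc, ih, hkeys, pvNewKeys_cons_mem ks hm]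
    · have hc' : d.contains k = false := by simpa using hc
      have hm : k ∉ d.keys := fun hm => by
        simp [(PySem.Dict.contains_iff_mem_keys d k).mpr hm] at hc'
      have hkeys : (pvCountStep d k).keys = d.keys ++ [k] :=
        PySem.Dict.keys_insert_of_not_contains d _ hc'
      have hcongr : pvNewKeys ks (d.keys ++ [k]) = pvNewKeys ks (k :: d.keys) :=
        pvNewKeys_congr ks _ _ (by intro x; simp; tauto)
      cases hr : pvRank? (pvNorm k) with
      | some r =>
        rw [pvScanKey_new_rank hr d best fb hc', ih, hkeys, pvNewKeys_cons_not_mem ks hm,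
          hcongr, List.foldl_cons, List.filter_cons, if_neg (by simp [hr])]
      | none =>
        by_cases hp : pvContPred (pvNorm k) = true
        · rw [pvScanKey_new_norank_pred hr hp d best fb hc', ih, hkeys,
            pvNewKeys_cons_not_mem ks hm, hcongr, List.foldl_cons, List.filter_cons,
            if_pos (by simp [hr, hp]), pvBestStep_of_none hr]
          simp
        · have hp' : pvContPred (pvNorm k) = false := by simpa using hp
          rw [pvScanKey_new_norank_nopred hr hp' d best fb hc', ih, hkeys,
            pvNewKeys_cons_not_mem ks hm, hcongr, List.foldl_cons, List.filter_cons,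
            if_neg (by simp [hr, hp']), pvBestStep_of_none hr]

theorem pvKeyCounts_nodup (records : List (List (String × Int))) :
    (pvKeyCounts records).keys.Nodup := by
  have H : ∀ (rs : List (List (String × Int))) (d : PySem.Dict String Int), d.keys.Nodup →
      (rs.foldl (fun d rec => (PySem.List.dedup (rec.map Prod.fst)).foldl
        (fun d k => d.insert k (d.getD k 0 + 1)) d) d).keys.Nodup := by
    intro rs
    induction rs with
    | nil => intro d h; exact h
    | cons r rs ih =>
      intro d h
      exact ih _ (PySem.Dict.nodup_keys_foldl_insert _ _ _ h)
  exact H records PySem.Dict.empty PySem.Dict.nodup_keys_empty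

theorem pvNormalized_items (keys : List String) (h : keys.Nodup) :
    (keys.foldl (fun d k => d.insert k (pvNorm k)) PySem.Dict.empty).items
      = keys.map (fun k => (k, pvNorm k)) := by
  have := PySem.Dict.items_foldl_insert_fresh (l := keys) (k := fun a => a)
    (v := fun a => pvNorm a) (d := PySem.Dict.empty)
    (by intro a _; exact PySem.Dict.contains_empty a) (by simpa using h)
  simpa using this

theorem pvFold_acc (keys : List String) (r : Int) (k0 : String) :
    keys.foldl pvBestStep (some (r, k0)) =
      match keys.foldl pvBestStep none with
      | none => some (r, k0)
      | some (r', k') => if r' < r then some (r', k') else some (r, k0) := by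
  induction keys generalizing r k0 with
  | nil => rfl
  | cons k keys ih =>
    simp only [List.foldl_cons]
    cases hrk : pvRank? (pvNorm k) with
    | none =>
      rw [pvBestStep_of_none hrk, pvBestStep_of_none hrk]
      exact ih r k0
    | some r2 =>
      rw [pvBestStep_none_of_some hrk, pvBestStep_some_of_some hrk]
      by_cases h2 : r2 < r
      · rw [if_pos h2, ih r2 k]
        cases hc : keys.foldl pvBestStep none with
        | none => simp only; split_ifs <;> (try rfl) <;> (try omega) <;> simp_all <;> try omega
        | some p =>
          obtain ⟨r', k'⟩ := p
          simp only
          split_ifs <;> (try rfl) <;> (try omega) <;> simp_all <;> try omega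
      · rw [if_neg h2, ih r k0, ih r2 k]
        cases hc : keys.foldl pvBestStep none with
        | none => simp only; split_ifs <;> (try rfl) <;> (try omega) <;> simp_all <;> try omega
        | some p =>
          obtain ⟨r', k'⟩ := p
          simp only
          split_ifs <;> (try rfl) <;> (try omega) <;> simp_all <;> try omega

theorem pvBest_eq (keys : List String) : keys.foldl pvBestStep none = pvCanon keys := by
  induction keys with
  | nil => rfl
  | cons k keys ih =>
    simp only [List.foldl_cons]
    by_cases h0 : pvNorm k = "invoiceid"
    · have hrk : pvRank? (pvNorm k) = some 0 := by simp [pvRank?, h0]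
      rw [pvBestStep_none_of_some hrk, pvFold_acc, ih]
      unfold pvCanon
      rw [List.find?_cons_of_pos (by simp [h0])]
      cases hA : keys.find? (fun k => pvNorm k == "invoiceid") <;>
        cases hB : keys.find? (fun k => pvNorm k == "invoice") <;>
        cases hC : keys.find? (fun k => pvNorm k == "invid") <;>
        cases hD : keys.find? (fun k => pvNorm k == "id") <;>
        simp_all <;> omega
    · by_cases h1 : pvNorm k = "invoice"
      · have hrk : pvRank? (pvNorm k) = some 2 := by simp [pvRank?, h1]
        rw [pvBestStep_none_of_some hrk, pvFold_acc, ih]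
        unfold pvCanon
        rw [List.find?_cons_of_neg (by simp [h0]), List.find?_cons_of_pos (by simp [h1])]
        cases hA : keys.find? (fun k => pvNorm k == "invoiceid") <;>
          cases hB : keys.find? (fun k => pvNorm k == "invoice") <;>
          cases hC : keys.find? (fun k => pvNorm k == "invid") <;>
          cases hD : keys.find? (fun k => pvNorm k == "id") <;>
          simp_all <;> omega
      · by_cases h2 : pvNorm k = "invid"
        · have hrk : pvRank? (pvNorm k) = some 3 := by simp [pvRank?, h2]
          rw [pvBestStep_none_of_some hrk, pvFold_acc, ih]
          unfold pvCanon
          rw [List.find?_cons_of_neg (by simp [h0]), List.find?_cons_of_neg (by simp [h1]),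
            List.find?_cons_of_pos (by simp [h2])]
          cases hA : keys.find? (fun k => pvNorm k == "invoiceid") <;>
            cases hB : keys.find? (fun k => pvNorm k == "invoice") <;>
            cases hC : keys.find? (fun k => pvNorm k == "invid") <;>
            cases hD : keys.find? (fun k => pvNorm k == "id") <;>
            simp_all <;> omega
        · by_cases h3 : pvNorm k = "id"
          · have hrk : pvRank? (pvNorm k) = some 4 := by simp [pvRank?, h3]
            rw [pvBestStep_none_of_some hrk, pvFold_acc, ih]
            unfold pvCanon
            rw [List.find?_cons_of_neg (by simp [h0]), List.find?_cons_of_neg (by simp [h1]),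
              List.find?_cons_of_neg (by simp [h2]), List.find?_cons_of_pos (by simp [h3])]
            cases hA : keys.find? (fun k => pvNorm k == "invoiceid") <;>
              cases hB : keys.find? (fun k => pvNorm k == "invoice") <;>
              cases hC : keys.find? (fun k => pvNorm k == "invid") <;>
              cases hD : keys.find? (fun k => pvNorm k == "id") <;>
              simp_all <;> omega
          · have hrk : pvRank? (pvNorm k) = none := by simp [pvRank?, h0, h1, h2, h3]
            rw [pvBestStep_of_none hrk, ih]
            unfold pvCanon
            rw [List.find?_cons_of_neg (by simp [h0]), List.find?_cons_of_neg (by simp [h1]),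
              List.find?_cons_of_neg (by simp [h2]), List.find?_cons_of_neg (by simp [h3])]

theorem pvBest_none (keys : List String) (h : keys.foldl pvBestStep none = none) :
    ∀ k ∈ keys, pvRank? (pvNorm k) = none := by
  induction keys with
  | nil => intro k hk; cases hk
  | cons k keys ih =>
    intro k' hk'
    rw [List.foldl_cons] at h
    cases hrk : pvRank? (pvNorm k) with
    | some r =>
      rw [pvBestStep_none_of_some hrk, pvFold_acc] at h
      cases hc : keys.foldl pvBestStep none <;> simp [hc] at h <;> split at h <;> simp_all
    | none =>
      rw [pvBestStep_of_none hrk] at h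
      rcases List.mem_cons.mp hk' with rfl | hmem
      · exact hrk
      · exact ih h k' hmem

theorem pvCanon_none_id (keys : List String) (h : pvCanon keys = none) :
    keys.find? (fun k => pvNorm k == "id") = none := by
  unfold pvCanon at h
  cases hA : keys.find? (fun k => pvNorm k == "invoiceid") <;>
    cases hB : keys.find? (fun k => pvNorm k == "invoice") <;>
    cases hC : keys.find? (fun k => pvNorm k == "invid") <;>
    cases hD : keys.find? (fun k => pvNorm k == "id") <;>
    simp_all

theorem pvPhaseA_eq (keys : List String) :
    pvPhaseA ["invoiceid", "invoice_id", "invoice", "inv_id", "id"]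
        (keys.map (fun k => (k, pvNorm k)))
      = (pvCanon keys).map (·.2) := by
  have e1 : PySem.Str.replace "invoiceid" "_" "" = "invoiceid" := by decide
  have e2 : PySem.Str.replace "invoice_id" "_" "" = "invoiceid" := by decide
  have e3 : PySem.Str.replace "invoice" "_" "" = "invoice" := by decide
  have e4 : PySem.Str.replace "inv_id" "_" "" = "invid" := by decide
  have e5 : PySem.Str.replace "id" "_" "" = "id" := by decide
  simp only [pvPhaseA, e1, e2, e3, e4, e5, List.find?_map]
  have hcomp : ∀ c : String,
      ((fun p : String × String => p.2 == c) ∘ fun k => (k, pvNorm k)) = fun k => pvNorm k == c :=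
    fun c => rfl
  simp only [hcomp]
  unfold pvCanon
  cases hA : keys.find? (fun k => pvNorm k == "invoiceid") <;>
    cases hB : keys.find? (fun k => pvNorm k == "invoice") <;>
    cases hC : keys.find? (fun k => pvNorm k == "invid") <;>
    cases hD : keys.find? (fun k => pvNorm k == "id") <;>
    simp_all

theorem pvFilterMap (keys : List String) :
    ((keys.map (fun k => (k, pvNorm k))).filter (fun p => pvContPred p.2)).map (·.1)
      = keys.filter (fun k => pvContPred (pvNorm k)) := by
  induction keys with
  | nil => rfl
  | cons k keys ih =>
    simp only [List.map_cons, List.filter_cons]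
    by_cases hp : pvContPred (pvNorm k) = true <;> simp [hp, ih]

theorem pvFindMap (c : String) (keys : List String) :
    (keys.map (fun k => (k, pvNorm k))).find? (fun p => p.2 == c)
      = (keys.find? (fun k => pvNorm k == c)).map (fun k => (k, pvNorm k)) := by
  induction keys with
  | nil => rfl
  | cons k keys ih =>
    by_cases hp : (pvNorm k == c) = true <;>
      simp [hp, ih]

-- the whole of B's state after the streaming pass, in terms of A's quantities
theorem pvAltState (records : List (List (String × Int))) :
    records.foldl
        (fun st rec => (PySem.List.dedup (rec.map Prod.fst)).foldl pvScanKey st)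
        (PySem.Dict.empty, none, []) =
      (pvKeyCounts records,
       (pvKeyCounts records).keys.foldl pvBestStep none,
       (pvKeyCounts records).keys.filter
         (fun k => (pvRank? (pvNorm k)).isNone && pvContPred (pvNorm k))) := by
  have hA : pvKeyCounts records = (pvKs records).foldl pvCountStep PySem.Dict.empty := by
    unfold pvKeyCounts pvKs pvCountStep
    exact (pvFoldlFlatMap _ _ _ _).symm
  have hB : records.foldl
        (fun st rec => (PySem.List.dedup (rec.map Prod.fst)).foldl pvScanKey st)
        (PySem.Dict.empty, none, []) =
      (pvKs records).foldl pvScanKey (PySem.Dict.empty, none, []) := by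
    unfold pvKs
    exact (pvFoldlFlatMap _ _ _ _).symm
  have hkeys : (pvKeyCounts records).keys = pvNewKeys (pvKs records) [] := by
    rw [hA, pvKeysCountFold]
    simp [PySem.Dict.keys_empty]
  rw [hB, pvScanInv]
  rw [show (PySem.Dict.empty : PySem.Dict String Int).keys = [] from PySem.Dict.keys_empty]
  rw [← hkeys, ← hA]
  simp

-- ===== VERDICT (by name: the statement is the Claim_ definition above) =====
set_option maxHeartbeats 1000000 in
theorem detect_invoice_field_spec : Claim_equal_detect_invoice_field := by
  intro records _hdom
  unfold Spec_detect_invoice_field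
  by_cases h : records = []
  · subst h; rfl
  · have hnd := pvKeyCounts_nodup records
    have hitems := pvNormalized_items (pvKeyCounts records).keys hnd
    simp only [detect_invoice_field, detect_invoice_field_alt, if_neg h, hitems, pvPhaseA_eq,
      pvFilterMap, pvFindMap, pvAltState, pvBest_eq]
    cases hc : pvCanon (pvKeyCounts records).keys with
    | some p => rfl
    | none =>
      rw [pvCanon_none_id _ hc]
      simp only [Option.map_none]
      have hfb : (pvKeyCounts records).keys.filter
            (fun k => (pvRank? (pvNorm k)).isNone && pvContPred (pvNorm k))
          = (pvKeyCounts records).keys.filter (fun k => pvContPred (pvNorm k)) := by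
        apply List.filter_congr
        intro k hk
        rw [pvBest_none _ (by rw [pvBest_eq]; exact hc) k hk]
        simp
      rw [hfb]
      by_cases hcont : (pvKeyCounts records).keys.filter (fun k => pvContPred (pvNorm k)) = []
      · rw [if_neg (not_not_intro hcont), if_neg (not_not_intro hcont)]
      · rw [if_pos hcont, if_pos hcont, ← pvSortedHead]
        cases PySem.List.sorted2 ((pvKeyCounts records).keys.filter (fun k => pvContPred (pvNorm k)))
            (fun kk => -((pvKeyCounts records).getD kk 0)) (fun kk => (PySem.Str.len kk : Int)) with
        | nil => rfl
        | cons x t => rfl
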